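-- pv_equiv track=rewrite | github.com/adrianmoac/clone-code-detection | originalDataset/1298194.py | solve
-- ===== SOURCE A (Python) =====
-- INF = 10 ** 20
--
-- def solve(H, W):
--     ans = INF
--
--     if H % 3 == 0 or W % 3 == 0:
--         return 0
--     else:
--         ans = min(ans, H, W)
--
--     if W % 2 == 0:
--         for h in range(1, H):
--             num_1 = h * W
--             num_2 = (H - h) * W // 2
--             ans = min(ans, abs(num_1 - num_2))
--     else:
--         for h in range(1, H):
--             num_1 = h * W
--             num_2 = (H - h) * (W // 2)
--             num_3 = (H - h) * (W // 2 + 1)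
--             nums = sorted([num_1, num_2, num_3])
--             ans = min(ans, (nums[2] - nums[0]))
--
--     if H % 2 == 0:
--         for w in range(1, W):
--             num_1 = w * H
--             num_2 = (W - w) * H // 2
--             ans = min(ans, abs(num_1 - num_2))
--     else:
--         for w in range(1, W):
--             num_1 = w * H
--             num_2 = (W - w) * (H // 2)
--             num_3 = (W - w) * (H // 2 + 1)
--             nums = sorted([num_1, num_2, num_3])
--             ans = min(ans, (nums[2] - nums[0]))
--
--     return ans
-- ===== SOURCE B (Python) =====
-- INF = 10 ** 20
--
-- def _f(a, b, c):
--     # areas of the three pieces when the first cut is at height c and the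
--     # remaining (a-c) x b strip is halved along the other axis
--     p1 = c * b
--     p2 = (a - c) * (b // 2)
--     p3 = (a - c) * ((b + 1) // 2)
--     return max(p1, p2, p3) - min(p1, p2, p3)
--
-- def _best(a, b):
--     # max-min is non-increasing until the first piece overtakes the larger
--     # half-piece and non-decreasing afterwards, so only the two cut positions
--     # around the crossing point ceil(a*r/(b+r)) need to be evaluated
--     r = (b + 1) // 2
--     h0 = -((-(a * r)) // (b + r))
--     return min(_f(a, b, max(1, h0 - 1)), _f(a, b, h0))
--
-- def solve(H, W):
--     if H % 3 == 0 or W % 3 == 0: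
--         return 0
--     ans = min(INF, H, W)
--     if H >= 2:
--         ans = min(ans, _best(H, W))
--     if W >= 2:
--         ans = min(ans, _best(W, H))
--     return ans
-- ===== Notes on version B (the rewrite author's own statement) =====
-- stated objective: faster
-- what changed: Instead of scanning every first-cut position in both orientations (A's four parity-specialised loops), B evaluates the objective at only the two candidate cut positions around the balance point ceil(a*r/(b+r)) per orientation, proved optimal because max-min of the three pieces is non-increasing before that point and non-decreasing after it; intended as faster (no loop), measured 562x median at the probe's largest size though inputs hitting the divisible-by-3 early return are unchanged.
import Mathlib
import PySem

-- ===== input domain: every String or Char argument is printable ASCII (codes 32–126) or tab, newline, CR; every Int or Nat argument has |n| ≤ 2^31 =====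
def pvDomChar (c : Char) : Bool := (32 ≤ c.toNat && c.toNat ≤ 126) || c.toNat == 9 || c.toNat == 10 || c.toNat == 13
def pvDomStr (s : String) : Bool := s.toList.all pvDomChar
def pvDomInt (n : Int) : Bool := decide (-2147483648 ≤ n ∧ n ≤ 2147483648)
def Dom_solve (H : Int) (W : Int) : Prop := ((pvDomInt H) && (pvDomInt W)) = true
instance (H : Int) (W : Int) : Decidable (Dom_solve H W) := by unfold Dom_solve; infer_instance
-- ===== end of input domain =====

-- B replaces A's scans over all first-cut positions by an evaluation at only the two
-- cut positions around the balance point ceil(a*r/(b+r)) in each orientation, proved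
-- optimal below (the objective is non-increasing before that point, non-decreasing after).
-- Intended as faster (no loop over cut positions); a timing run measured a 562x median
-- at its largest size but inputs hitting the divisible-by-3 early return show no difference.

-- ===== PORT A =====
def pvINF : Int := 10 ^ 20

def solve (H : Int) (W : Int) : Int :=
  if PySem.Int.mod H 3 = 0 ∨ PySem.Int.mod W 3 = 0 then 0
  else
    let ans := min (min pvINF H) W
    let ans :=
      if PySem.Int.mod W 2 = 0 then
        (PySem.List.pyRange 1 H 1).foldl (fun ans h =>
          let num1 := h * W
          let num2 := PySem.Int.floordiv ((H - h) * W) 2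
          min ans |num1 - num2|) ans
      else
        (PySem.List.pyRange 1 H 1).foldl (fun ans h =>
          let num1 := h * W
          let num2 := (H - h) * PySem.Int.floordiv W 2
          let num3 := (H - h) * (PySem.Int.floordiv W 2 + 1)
          let nums := PySem.List.sorted [num1, num2, num3] id
          min ans (nums.getD 2 0 - nums.getD 0 0)) ans
    let ans :=
      if PySem.Int.mod H 2 = 0 then
        (PySem.List.pyRange 1 W 1).foldl (fun ans w =>
          let num1 := w * H
          let num2 := PySem.Int.floordiv ((W - w) * H) 2
          min ans |num1 - num2|) ans
      else
        (PySem.List.pyRange 1 W 1).foldl (fun ans w =>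
          let num1 := w * H
          let num2 := (W - w) * PySem.Int.floordiv H 2
          let num3 := (W - w) * (PySem.Int.floordiv H 2 + 1)
          let nums := PySem.List.sorted [num1, num2, num3] id
          min ans (nums.getD 2 0 - nums.getD 0 0)) ans
    ans

-- ===== PORT B =====
def pvF (a : Int) (b : Int) (c : Int) : Int :=
  let p1 := c * b
  let p2 := (a - c) * PySem.Int.floordiv b 2
  let p3 := (a - c) * PySem.Int.floordiv (b + 1) 2
  max p1 (max p2 p3) - min p1 (min p2 p3)

def pvBestC (a : Int) (b : Int) : Int :=
  let r := PySem.Int.floordiv (b + 1) 2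
  let h0 := -(PySem.Int.floordiv (-(a * r)) (b + r))
  min (pvF a b (max 1 (h0 - 1))) (pvF a b h0)

def solve_alt (H : Int) (W : Int) : Int :=
  if PySem.Int.mod H 3 = 0 ∨ PySem.Int.mod W 3 = 0 then 0
  else
    let ans := min (min (10 ^ 20) H) W
    let ans := if 2 ≤ H then min ans (pvBestC H W) else ans
    let ans := if 2 ≤ W then min ans (pvBestC W H) else ans
    ans

-- ===== PRECONDITION & SPEC =====
def Spec_solve (H : Int) (W : Int) (out : Int) : Prop := out = solve_alt H W
instance (H : Int) (W : Int) (out : Int) : Decidable (Spec_solve H W out) := by unfold Spec_solve; infer_instance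

-- ===== CLAIM (what is proved, stated in full; the proofs are below) =====
def Claim_equal_solve : Prop := ∀ (H : Int) (W : Int), Dom_solve H W → Spec_solve H W (solve H W)

-- ===== LEMMAS AND PROOFS =====

set_option maxHeartbeats 2000000 in
theorem pv_sorted3 (x y z : Int) :
    (PySem.List.sorted [x, y, z] id).getD 2 0 - (PySem.List.sorted [x, y, z] id).getD 0 0
      = max x (max y z) - min x (min y z) := by
  simp only [PySem.List.sorted, List.foldl, if_neg (by decide : ¬ (false = true)), id]
  simp only [PySem.List.insertBy, decide_eq_true_eq]
  split_ifs <;>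
    (try simp only [PySem.List.insertBy, decide_eq_true_eq]) <;>
    (try split_ifs) <;>
    simp [max_def, min_def] <;> (try split_ifs) <;> omega

-- even b: A's abs of the two distinct areas equals B's max - min of the three pieces
theorem pv_body_even (a b : Int) (hb : PySem.Int.mod b 2 = 0) (c : Int) :
    |c * b - PySem.Int.floordiv ((a - c) * b) 2| = pvF a b c := by
  unfold pvF
  dsimp only
  rw [PySem.Int.mod_eq_emod_of_pos (by norm_num)] at hb
  rw [PySem.Int.floordiv_eq_ediv_of_pos (by norm_num),
      PySem.Int.floordiv_eq_ediv_of_pos (by norm_num),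
      PySem.Int.floordiv_eq_ediv_of_pos (by norm_num)]
  obtain ⟨k, rfl⟩ : ∃ k, b = 2 * k := ⟨b / 2, by omega⟩
  have h1 : (a - c) * (2 * k) / 2 = (a - c) * k := by
    rw [show (a - c) * (2 * k) = 2 * ((a - c) * k) by ring]; omega
  have h2 : (2 * k) / 2 = k := by omega
  have h3 : (2 * k + 1) / 2 = k := by omega
  rw [h1, h2, h3, max_self, min_self, max_sub_min_eq_abs, abs_sub_comm]

-- odd b: A's b//2 + 1 is (b+1)//2, so A's sorted-span equals pvF
theorem pv_body_odd (a b : Int) (hb : ¬ PySem.Int.mod b 2 = 0) (c : Int) :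
    (PySem.List.sorted [c * b, (a - c) * PySem.Int.floordiv b 2,
        (a - c) * (PySem.Int.floordiv b 2 + 1)] id).getD 2 0
      - (PySem.List.sorted [c * b, (a - c) * PySem.Int.floordiv b 2,
        (a - c) * (PySem.Int.floordiv b 2 + 1)] id).getD 0 0 = pvF a b c := by
  unfold pvF
  dsimp only
  rw [pv_sorted3]
  rw [PySem.Int.mod_eq_emod_of_pos (by norm_num)] at hb
  rw [PySem.Int.floordiv_eq_ediv_of_pos (by norm_num),
      PySem.Int.floordiv_eq_ediv_of_pos (by norm_num)]
  have h : b / 2 + 1 = (b + 1) / 2 := by omega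
  rw [h]

-- each of A's parity-split loops is the uniform min-fold of pvF over all cuts
theorem pv_loop_norm (a b init : Int) :
    (if PySem.Int.mod b 2 = 0 then
        (PySem.List.pyRange 1 a 1).foldl (fun ans h =>
          let num1 := h * b
          let num2 := PySem.Int.floordiv ((a - h) * b) 2
          min ans |num1 - num2|) init
      else
        (PySem.List.pyRange 1 a 1).foldl (fun ans h =>
          let num1 := h * b
          let num2 := (a - h) * PySem.Int.floordiv b 2
          let num3 := (a - h) * (PySem.Int.floordiv b 2 + 1)
          let nums := PySem.List.sorted [num1, num2, num3] id
          min ans (nums.getD 2 0 - nums.getD 0 0)) init)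
      = (PySem.List.pyRange 1 a 1).foldl (fun ans h => min ans (pvF a b h)) init := by
  split
  · rename_i hb
    refine congrArg (fun f => (PySem.List.pyRange 1 a 1).foldl f init) ?_
    funext ans h
    simp only
    rw [pv_body_even a b hb h]
  · rename_i hb
    refine congrArg (fun f => (PySem.List.pyRange 1 a 1).foldl f init) ?_
    funext ans h
    simp only
    rw [pv_body_odd a b hb h]

-- generic min-fold facts
theorem pv_foldl_le_init (f : Int → Int) (L : List Int) (init : Int) :
    L.foldl (fun ans h => min ans (f h)) init ≤ init := by
  induction L generalizing init with
  | nil => simp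
  | cons x xs ih => exact le_trans (ih _) (min_le_left _ _)

theorem pv_foldl_le_mem (f : Int → Int) (L : List Int) (init x : Int) (hx : x ∈ L) :
    L.foldl (fun ans h => min ans (f h)) init ≤ f x := by
  induction L generalizing init with
  | nil => simp at hx
  | cons y ys ih =>
    rcases List.mem_cons.mp hx with rfl | hx'
    · exact le_trans (pv_foldl_le_init f ys _) (min_le_right _ _)
    · exact ih _ hx'

theorem pv_foldl_ge (f : Int → Int) (L : List Int) (init m : Int)
    (h0 : m ≤ init) (h1 : ∀ x ∈ L, m ≤ f x) :
    m ≤ L.foldl (fun ans h => min ans (f h)) init := by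
  induction L generalizing init with
  | nil => simpa using h0
  | cons y ys ih =>
    exact ih _ (le_min h0 (h1 y (by simp))) (fun x hx => h1 x (by simp [hx]))

theorem pv_foldl_eq_init (f : Int → Int) (L : List Int) (init : Int)
    (h1 : ∀ x ∈ L, init ≤ f x) :
    L.foldl (fun ans h => min ans (f h)) init = init :=
  le_antisymm (pv_foldl_le_init f L init) (pv_foldl_ge f L init init le_rfl h1)

theorem pv_foldl_eq_min2 (f : Int → Int) (L : List Int) (init c1 c2 : Int)
    (hc1 : c1 ∈ L) (hc2 : c2 ∈ L) (hlb : ∀ x ∈ L, min (f c1) (f c2) ≤ f x) :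
    L.foldl (fun ans h => min ans (f h)) init = min init (min (f c1) (f c2)) := by
  refine le_antisymm ?_ ?_
  · exact le_min (pv_foldl_le_init f L init)
      (le_min (pv_foldl_le_mem f L init c1 hc1) (pv_foldl_le_mem f L init c2 hc2))
  · exact pv_foldl_ge f L init _ (min_le_left _ _)
      (fun x hx => le_trans (min_le_right _ _) (hlb x hx))

theorem pv_f_nonneg (a b c : Int) : 0 ≤ pvF a b c := by
  unfold pvF
  dsimp only
  have h1 : min (c * b) (min ((a - c) * PySem.Int.floordiv b 2)
      ((a - c) * PySem.Int.floordiv (b + 1) 2)) ≤ c * b := min_le_left _ _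
  have h2 : c * b ≤ max (c * b) (max ((a - c) * PySem.Int.floordiv b 2)
      ((a - c) * PySem.Int.floordiv (b + 1) 2)) := le_max_left _ _
  omega

theorem pv_best_nonneg (a b : Int) : 0 ≤ pvBestC a b := by
  unfold pvBestC
  exact le_min (pv_f_nonneg _ _ _) (pv_f_nonneg _ _ _)

-- the abstract one-step inequalities about the three piece areas
theorem pv_step_dec (p1 p2 p3 P1 P2 P3 q r : Int) (hq : 0 ≤ q) (hqr : q ≤ r)
    (h23 : p2 ≤ p3) (H23 : P2 ≤ P3)
    (e1 : P1 = p1 + q + r) (e2 : P2 = p2 - q) (e3 : P3 = p3 - r) (hc : P1 ≤ P3) :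
    max P1 (max P2 P3) - min P1 (min P2 P3) ≤ max p1 (max p2 p3) - min p1 (min p2 p3) := by
  omega

theorem pv_step_inc (p1 p2 p3 P1 P2 P3 q r : Int) (hq : 0 ≤ q) (hqr : q ≤ r)
    (h23 : p2 ≤ p3) (H23 : P2 ≤ P3)
    (e1 : P1 = p1 + q + r) (e2 : P2 = p2 - q) (e3 : P3 = p3 - r) (hc : p3 ≤ p1) :
    max p1 (max p2 p3) - min p1 (min p2 p3) ≤ max P1 (max P2 P3) - min P1 (min P2 P3) := by
  omega

-- pvF written with explicit halves q = b//2, r = (b+1)//2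
theorem pv_f_eq (a b c : Int) :
    pvF a b c = max (c * b) (max ((a - c) * (b / 2)) ((a - c) * ((b + 1) / 2)))
      - min (c * b) (min ((a - c) * (b / 2)) ((a - c) * ((b + 1) / 2))) := by
  unfold pvF
  dsimp only
  simp only [PySem.Int.floordiv_eq_ediv_of_pos (show (0:Int) < 2 by norm_num)]

-- the objective is non-increasing while the first piece is at most the larger half
theorem pv_mono_dec (a q r c : Int) (hq : 0 ≤ q) (hqr : q ≤ r) (hr : 1 ≤ r)
    (hc1 : 1 ≤ c) (hcb : c * (q + r) < (a - c) * r) :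
    ∀ h, 1 ≤ h → h ≤ c →
      max (c * (q + r)) (max ((a - c) * q) ((a - c) * r))
        - min (c * (q + r)) (min ((a - c) * q) ((a - c) * r))
      ≤ max (h * (q + r)) (max ((a - h) * q) ((a - h) * r))
        - min (h * (q + r)) (min ((a - h) * q) ((a - h) * r)) := by
  have hac : c < a := by nlinarith
  have key : ∀ n : Nat, ∀ h : Int, 1 ≤ h → h + n = c →
      max (c * (q + r)) (max ((a - c) * q) ((a - c) * r))
        - min (c * (q + r)) (min ((a - c) * q) ((a - c) * r))
      ≤ max (h * (q + r)) (max ((a - h) * q) ((a - h) * r))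
        - min (h * (q + r)) (min ((a - h) * q) ((a - h) * r)) := by
    intro n
    induction n with
    | zero => intro h h1 he; simp only [Nat.cast_zero, add_zero] at he; subst he; exact le_rfl
    | succ n ih =>
      intro h h1 he
      have he' : (h + 1) + (n : Int) = c := by push_cast at he ⊢; omega
      refine le_trans (ih (h + 1) (by omega) he') ?_
      -- one step down from h+1 to h
      have hh1c : h + 1 ≤ c := by omega
      exact pv_step_dec (h * (q + r)) ((a - h) * q) ((a - h) * r)
        ((h + 1) * (q + r)) ((a - (h + 1)) * q) ((a - (h + 1)) * r) q r hq hqr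
        (by nlinarith) (by nlinarith) (by ring) (by ring) (by ring) (by nlinarith)
  intro h h1 h2
  exact key (c - h).toNat h h1 (by omega)

-- the objective is non-decreasing once the first piece is at least the larger half
theorem pv_mono_inc (a q r c : Int) (hq : 0 ≤ q) (hqr : q ≤ r)
    (hcb : (a - c) * r ≤ c * (q + r)) :
    ∀ h, c ≤ h → h ≤ a - 1 →
      max (c * (q + r)) (max ((a - c) * q) ((a - c) * r))
        - min (c * (q + r)) (min ((a - c) * q) ((a - c) * r))
      ≤ max (h * (q + r)) (max ((a - h) * q) ((a - h) * r))
        - min (h * (q + r)) (min ((a - h) * q) ((a - h) * r)) := by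
  have key : ∀ n : Nat, ∀ h : Int, h ≤ a - 1 → c + n = h →
      max (c * (q + r)) (max ((a - c) * q) ((a - c) * r))
        - min (c * (q + r)) (min ((a - c) * q) ((a - c) * r))
      ≤ max (h * (q + r)) (max ((a - h) * q) ((a - h) * r))
        - min (h * (q + r)) (min ((a - h) * q) ((a - h) * r)) := by
    intro n
    induction n with
    | zero => intro h hha he; simp only [Nat.cast_zero, add_zero] at he; subst he; exact le_rfl
    | succ n ih =>
      intro h hha he
      have he' : c + (n : Int) = h - 1 := by push_cast at he ⊢; omega
      refine le_trans (ih (h - 1) (by omega) he') ?_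
      have hch : c ≤ h - 1 := by omega
      have hp : (a - (h - 1)) * r ≤ (h - 1) * (q + r) := by nlinarith
      have := pv_step_inc ((h - 1) * (q + r)) ((a - (h - 1)) * q) ((a - (h - 1)) * r)
        (h * (q + r)) ((a - h) * q) ((a - h) * r) q r hq hqr
        (by nlinarith) (by nlinarith) (by ring) (by ring) (by ring) (by nlinarith)
      convert this using 3 <;> ring
  intro h h1 h2
  exact key (h - c).toNat h h2 (by omega)

-- any cut's objective dominates the better of the two candidate cuts around the crossing
theorem pv_cand (a q r h0 h : Int) (hq : 0 ≤ q) (hqr : q ≤ r) (hr : 1 ≤ r) (ha : 2 ≤ a)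
    (hch1 : (h0 - 1) * (q + r + r) < a * r) (hch2 : a * r ≤ h0 * (q + r + r))
    (h1 : 1 ≤ h) (h2 : h ≤ a - 1) :
    min (max ((max 1 (h0 - 1)) * (q + r))
          (max ((a - max 1 (h0 - 1)) * q) ((a - max 1 (h0 - 1)) * r))
        - min ((max 1 (h0 - 1)) * (q + r))
          (min ((a - max 1 (h0 - 1)) * q) ((a - max 1 (h0 - 1)) * r)))
       (max (h0 * (q + r)) (max ((a - h0) * q) ((a - h0) * r))
        - min (h0 * (q + r)) (min ((a - h0) * q) ((a - h0) * r)))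
      ≤ max (h * (q + r)) (max ((a - h) * q) ((a - h) * r))
        - min (h * (q + r)) (min ((a - h) * q) ((a - h) * r)) := by
  have h01 : 1 ≤ h0 := by nlinarith
  have h0a : h0 ≤ a - 1 := by
    by_contra hcon
    push_neg at hcon
    have e1 : (a - 1) * (q + r + r) ≤ (h0 - 1) * (q + r + r) := by nlinarith
    have e2 : a * r ≤ (a - 1) * (q + r + r) := by nlinarith
    linarith
  by_cases hcase : h ≤ h0 - 1
  · have hm : max 1 (h0 - 1) = h0 - 1 := by omega
    rw [hm]
    refine le_trans (min_le_left _ _)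
      (pv_mono_dec a q r (h0 - 1) hq hqr hr (by omega) ?_ h h1 hcase)
    nlinarith
  · push_neg at hcase
    refine le_trans (min_le_right _ _)
      (pv_mono_inc a q r h0 hq hqr ?_ h (by omega) h2)
    nlinarith

-- the full fold over all cuts collapses to the two candidates of pvBestC
theorem pv_orient (a b init : Int) (ha : 2 ≤ a) (hb : 1 ≤ b) :
    (PySem.List.pyRange 1 a 1).foldl (fun ans h => min ans (pvF a b h)) init
      = min init (pvBestC a b) := by
  have hq0 : 0 ≤ b / 2 := by omega
  have hqr : b / 2 ≤ (b + 1) / 2 := by omega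
  have hr1 : 1 ≤ (b + 1) / 2 := by omega
  have hsum : b / 2 + (b + 1) / 2 = b := by omega
  have hfr : PySem.Int.floordiv (b + 1) 2 = (b + 1) / 2 :=
    PySem.Int.floordiv_eq_ediv_of_pos (by norm_num)
  have hdpos : (0 : Int) < b + (b + 1) / 2 := by omega
  have hch : ((-(PySem.Int.floordiv (-(a * ((b + 1) / 2))) (b + (b + 1) / 2))) - 1)
        * (b + (b + 1) / 2) < a * ((b + 1) / 2)
      ∧ a * ((b + 1) / 2)
        ≤ (-(PySem.Int.floordiv (-(a * ((b + 1) / 2))) (b + (b + 1) / 2))) * (b + (b + 1) / 2) :=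
    (PySem.Int.neg_floordiv_neg_eq_iff_of_pos hdpos).mp rfl
  have heq : ∀ z : Int, z * (b + (b + 1) / 2) = z * (b / 2 + (b + 1) / 2 + (b + 1) / 2) := by
    intro z
    have hd : b + (b + 1) / 2 = b / 2 + (b + 1) / 2 + (b + 1) / 2 := by omega
    rw [hd]
  have hch1 := hch.1
  have hch2 := hch.2
  rw [heq] at hch1 hch2
  have har : (2 : Int) * 1 ≤ a * ((b + 1) / 2) := mul_le_mul ha hr1 (by norm_num) (by omega)
  have hfe : ∀ c : Int, pvF a b c
      = max (c * b) (max ((a - c) * (b / 2)) ((a - c) * ((b + 1) / 2)))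
        - min (c * b) (min ((a - c) * (b / 2)) ((a - c) * ((b + 1) / 2))) :=
    fun c => pv_f_eq a b c
  have hbq : ∀ c : Int, c * b = c * (b / 2 + (b + 1) / 2) := by intro c; rw [hsum]
  -- lower-bound property of the two candidates over the whole range
  have hlb : ∀ x ∈ PySem.List.pyRange 1 a 1,
      min (pvF a b (max 1 ((-(PySem.Int.floordiv (-(a * ((b + 1) / 2))) (b + (b + 1) / 2))) - 1)))
          (pvF a b (-(PySem.Int.floordiv (-(a * ((b + 1) / 2))) (b + (b + 1) / 2))))
        ≤ pvF a b x := by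
    intro x hx
    have hxb := PySem.List.mem_pyRange_one.mp hx
    rw [hfe, hfe, hfe, hbq, hbq, hbq]
    exact pv_cand a (b / 2) ((b + 1) / 2)
      (-(PySem.Int.floordiv (-(a * ((b + 1) / 2))) (b + (b + 1) / 2))) x
      hq0 hqr hr1 ha hch1 hch2 hxb.1 (by omega)
  have hmem2 : (-(PySem.Int.floordiv (-(a * ((b + 1) / 2))) (b + (b + 1) / 2)))
      ∈ PySem.List.pyRange 1 a 1 := by
    have h01 : 1 ≤ -(PySem.Int.floordiv (-(a * ((b + 1) / 2))) (b + (b + 1) / 2)) := by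
      by_contra hcon
      push_neg at hcon
      nlinarith [hch2, har]
    have h0a : -(PySem.Int.floordiv (-(a * ((b + 1) / 2))) (b + (b + 1) / 2)) ≤ a - 1 := by
      by_contra hcon
      push_neg at hcon
      have e1 : (a - 1) * (b / 2 + (b + 1) / 2 + (b + 1) / 2)
          ≤ ((-(PySem.Int.floordiv (-(a * ((b + 1) / 2))) (b + (b + 1) / 2))) - 1)
            * (b / 2 + (b + 1) / 2 + (b + 1) / 2) := by nlinarith
      have e2 : a * ((b + 1) / 2) ≤ (a - 1) * (b / 2 + (b + 1) / 2 + (b + 1) / 2) := by nlinarith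
      linarith [hch1]
    exact PySem.List.mem_pyRange_one.mpr ⟨h01, by omega⟩
  have hmem1 : (max 1 ((-(PySem.Int.floordiv (-(a * ((b + 1) / 2))) (b + (b + 1) / 2))) - 1))
      ∈ PySem.List.pyRange 1 a 1 := by
    have := PySem.List.mem_pyRange_one.mp hmem2
    exact PySem.List.mem_pyRange_one.mpr ⟨le_max_left _ _, by omega⟩
  rw [pv_foldl_eq_min2 (pvF a b) (PySem.List.pyRange 1 a 1) init _ _ hmem1 hmem2 hlb]
  unfold pvBestC
  dsimp only
  simp only [hfr]

-- one orientation of A (already normalised) equals one orientation of B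
theorem pv_side (a b init : Int) (hb : 1 ≤ b) :
    (PySem.List.pyRange 1 a 1).foldl (fun ans h => min ans (pvF a b h)) init
      = (if 2 ≤ a then min init (pvBestC a b) else init) := by
  split
  · exact pv_orient a b init (by assumption) hb
  · rw [PySem.List.pyRange_one_eq_nil (by omega)]; rfl

-- ===== VERDICT (by name: the statement is the Claim_ definition above) =====
theorem solve_spec : Claim_equal_solve := by
  intro H W _
  unfold Spec_solve solve solve_alt
  split
  · rfl
  · simp only [pvINF]
    rw [pv_loop_norm H W, pv_loop_norm W H]
    by_cases hH : 1 ≤ H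
    · by_cases hW : 1 ≤ W
      · rw [pv_side H W _ hW, pv_side W H _ hH]
      · push_neg at hW
        have hinit : min (min (10 ^ 20 : Int) H) W ≤ 0 :=
          le_trans (min_le_right _ _) (by omega)
        have e1 : (PySem.List.pyRange 1 H 1).foldl
            (fun ans h => min ans (pvF H W h)) (min (min (10 ^ 20 : Int) H) W)
            = min (min (10 ^ 20 : Int) H) W :=
          pv_foldl_eq_init _ _ _ (fun x _ => le_trans hinit (pv_f_nonneg H W x))
        rw [e1, pv_foldl_eq_init _ _ _ (fun x _ => le_trans hinit (pv_f_nonneg W H x))]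
        have m1 : min (min (min (10 ^ 20 : Int) H) W) (pvBestC H W)
            = min (min (10 ^ 20 : Int) H) W :=
          min_eq_left (le_trans hinit (pv_best_nonneg H W))
        have m2 : min (min (min (10 ^ 20 : Int) H) W) (pvBestC W H)
            = min (min (10 ^ 20 : Int) H) W :=
          min_eq_left (le_trans hinit (pv_best_nonneg W H))
        split_ifs <;> (try rw [m1]) <;> (try rw [m2]) <;> rfl
    · push_neg at hH
      have hinit : min (min (10 ^ 20 : Int) H) W ≤ 0 :=
        le_trans (min_le_left _ _) (le_trans (min_le_right _ _) (by omega))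
      have e1 : (PySem.List.pyRange 1 H 1).foldl
          (fun ans h => min ans (pvF H W h)) (min (min (10 ^ 20 : Int) H) W)
          = min (min (10 ^ 20 : Int) H) W :=
        pv_foldl_eq_init _ _ _ (fun x _ => le_trans hinit (pv_f_nonneg H W x))
      rw [e1, pv_foldl_eq_init _ _ _ (fun x _ => le_trans hinit (pv_f_nonneg W H x))]
      have m1 : min (min (min (10 ^ 20 : Int) H) W) (pvBestC H W)
          = min (min (10 ^ 20 : Int) H) W :=
        min_eq_left (le_trans hinit (pv_best_nonneg H W))
      have m2 : min (min (min (10 ^ 20 : Int) H) W) (pvBestC W H)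
          = min (min (10 ^ 20 : Int) H) W :=
        min_eq_left (le_trans hinit (pv_best_nonneg W H))
      split_ifs <;> (try rw [m1]) <;> (try rw [m2]) <;> rfl
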